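-- pv_equiv track=rewrite | github.com/Luca-Yucheng-Jin/luca-physics-site | build/tex_to_html.py | _split_tensor_indices
-- ===== SOURCE A (Python) =====
-- def _split_tensor_indices(s):
--     """Walk a tensor-index string and insert empty groups {} between each
--     pair of consecutive ^/_ operators so MathJax doesn't collapse them
--     into one stacked column. Returns the rewritten string."""
--     out = []
--     i = 0
--     seen_script = False
--     n = len(s)
--     while i < n:
--         ch = s[i]
--         if ch in "^_":
--             if seen_script:
--                 out.append("{}")
--             out.append(ch)
--             i += 1
--             # consume the script's argument: balanced {...}, or \cmd, or single char
--             while i < n and s[i] in " \t":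
--                 i += 1
--             if i >= n: break
--             if s[i] == "{":
--                 depth = 1
--                 start = i
--                 i += 1
--                 while i < n and depth > 0:
--                     if s[i] == "{": depth += 1
--                     elif s[i] == "}": depth -= 1
--                     i += 1
--                 out.append(s[start:i])
--             elif s[i] == "\\":
--                 start = i
--                 i += 1
--                 while i < n and (s[i].isalpha() or s[i] == "*"):
--                     i += 1
--                 out.append(s[start:i])
--             else:
--                 out.append(s[i])
--                 i += 1
--             seen_script = True
--         else:
--             # Non-script char: pass through. (Whitespace etc. between the
--             # operators is fine — it doesn't reset `seen_script`.)
--             out.append(ch)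
--             i += 1
--     return "".join(out)
-- ===== SOURCE B (Python) =====
-- def _grab_arg(t):
--     """Parse one script argument from the text right after a ^/_ operator:
--     leading spaces/tabs are dropped, then a balanced {...} group, a \\cmd
--     of alpha/* chars, or one single character.  Returns (arg, rest)."""
--     t = t.lstrip(" \t")
--     if not t:
--         return "", ""
--     if t[0] == "{":
--         depth, j = 1, 1
--         while j < len(t) and depth:
--             if t[j] == "{":
--                 depth += 1
--             elif t[j] == "}":
--                 depth -= 1
--             j += 1
--         return t[:j], t[j:]
--     if t[0] == "\\":
--         j = 1
--         while j < len(t) and (t[j].isalpha() or t[j] == "*"):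
--             j += 1
--         return t[:j], t[j:]
--     return t[0], t[1:]
--
--
-- def _split_tensor_indices(s):
--     # Pass 1: tokenize into plain characters and (operator, argument) units.
--     toks = []
--     i = 0
--     while i < len(s):
--         ch = s[i]
--         if ch in "^_":
--             arg, rest = _grab_arg(s[i + 1:])
--             toks.append((ch, arg))
--             i = len(s) - len(rest)
--         else:
--             toks.append(ch)
--             i += 1
--     # Pass 2: emit, inserting {} before every script unit after the first.
--     pieces = []
--     seen = False
--     for t in toks:
--         if isinstance(t, tuple):
--             if seen:
--                 pieces.append("{}")
--             pieces.append(t[0] + t[1])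
--             seen = True
--         else:
--             pieces.append(t)
--     return "".join(pieces)
-- ===== Notes on version B (the rewrite author's own statement) =====
-- stated objective: alternative
-- what changed: Replaced A's single interleaved scan-and-emit loop with a two-phase pipeline: a tokenizer producing plain-char / (operator, argument) tokens via a separate argument-grabbing helper (lstrip + slicing), then a second pass that renders the tokens and inserts {} before every non-first script token.
import Mathlib
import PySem

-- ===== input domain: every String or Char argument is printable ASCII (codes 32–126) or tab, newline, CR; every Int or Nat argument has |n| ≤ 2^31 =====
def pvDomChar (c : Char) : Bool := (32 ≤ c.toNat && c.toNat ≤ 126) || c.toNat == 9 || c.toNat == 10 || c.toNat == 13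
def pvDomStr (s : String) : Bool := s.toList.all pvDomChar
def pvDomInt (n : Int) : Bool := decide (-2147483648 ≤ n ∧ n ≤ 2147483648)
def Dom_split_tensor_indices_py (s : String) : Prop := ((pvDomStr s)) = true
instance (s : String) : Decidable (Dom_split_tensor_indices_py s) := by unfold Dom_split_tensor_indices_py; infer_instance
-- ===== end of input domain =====

-- B re-decomposes A's single scan-and-emit loop into tokenize + render passes; same output, same cost (objective: alternative).

-- ===== PORT A =====
-- A's inner "skip spaces/tabs" while loop (the skipped chars are dropped).
def pySkipWS : List Char → List Char
  | [] => []
  | c :: r => if c = ' ' || c = '\t' then pySkipWS r else c :: r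

-- A's balanced-brace while loop: consumes chars while depth > 0, returns (consumed, rest).
def pyBraces : List Char → Nat → List Char × List Char
  | l, 0 => ([], l)
  | [], _ + 1 => ([], [])
  | c :: r, d + 1 =>
      let p := pyBraces r (if c = '{' then d + 2 else if c = '}' then d else d + 1)
      (c :: p.1, p.2)

-- A's "\cmd" while loop: consumes chars while isalpha or '*'.
def pyCmd : List Char → List Char × List Char
  | [] => ([], [])
  | c :: r =>
      if c.isAlpha || c = '*' then
        let p := pyCmd r
        (c :: p.1, p.2)
      else ([], c :: r)

theorem pySkipWS_len (l : List Char) : (pySkipWS l).length ≤ l.length := by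
  induction l with
  | nil => simp [pySkipWS]
  | cons c r ih => simp only [pySkipWS]; split <;> simp <;> omega

theorem pyBraces_len (l : List Char) (d : Nat) : (pyBraces l d).2.length ≤ l.length := by
  induction l generalizing d with
  | nil => cases d <;> simp [pyBraces]
  | cons c r ih =>
      cases d with
      | zero => simp [pyBraces]
      | succ d => simpa [pyBraces] using Nat.le_succ_of_le (ih _)

theorem pyCmd_len (l : List Char) : (pyCmd l).2.length ≤ l.length := by
  induction l with
  | nil => simp [pyCmd]
  | cons c r ih => simp only [pyCmd]; split <;> simp <;> omega

-- A's main while loop over the string, with the seen_script flag.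
def stiAux : List Char → Bool → List Char
  | [], _ => []
  | ch :: rest, seen =>
    if ch = '^' || ch = '_' then
      match h1 : pySkipWS rest with
      | [] => (if seen then ['{', '}'] else []) ++ [ch]   -- "if i >= n: break"
      | '{' :: r =>
          (if seen then ['{', '}'] else []) ++
            ch :: '{' :: (pyBraces r 1).1 ++ stiAux (pyBraces r 1).2 true
      | '\\' :: r =>
          (if seen then ['{', '}'] else []) ++
            ch :: '\\' :: (pyCmd r).1 ++ stiAux (pyCmd r).2 true
      | c :: r => (if seen then ['{', '}'] else []) ++ [ch, c] ++ stiAux r true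
    else ch :: stiAux rest seen
termination_by l _ => l.length
decreasing_by
  · have h2 := pySkipWS_len rest
    have h3 := pyBraces_len r 1
    rw [h1] at h2; simp at h2 ⊢; omega
  · have h2 := pySkipWS_len rest
    have h3 := pyCmd_len r
    rw [h1] at h2; simp at h2 ⊢; omega
  · have h2 := pySkipWS_len rest
    rw [h1] at h2; simp at h2 ⊢; omega
  · simp

def split_tensor_indices_py (s : String) : String := String.ofList (stiAux s.toList false)

-- ===== PORT B =====
inductive PyTok
  | plain : Char → PyTok
  | script : Char → List Char → PyTok
deriving DecidableEq, Repr

-- Source B's brace branch of _grab_arg (tail-recursive, accumulator holds the consumed chars reversed).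
def braceGrab : List Char → Nat → List Char → List Char × List Char
  | l, 0, acc => (acc.reverse, l)
  | [], _ + 1, acc => (acc.reverse, [])
  | c :: r, d + 1, acc =>
      braceGrab r (if c = '{' then d + 2 else if c = '}' then d else d + 1) (c :: acc)

-- Source B's _grab_arg: lstrip, then balanced group / \cmd / single char.
def grabArg (l : List Char) : List Char × List Char :=
  match l.dropWhile (fun c => c = ' ' || c = '\t') with
  | [] => ([], [])
  | '{' :: r =>
      let p := braceGrab r 1 []
      ('{' :: p.1, p.2)
  | '\\' :: r =>
      ('\\' :: r.takeWhile (fun c => c.isAlpha || c = '*'),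
       r.dropWhile (fun c => c.isAlpha || c = '*'))
  | c :: r => ([c], r)

theorem braceGrab_len (l : List Char) (d : Nat) (acc : List Char) :
    (braceGrab l d acc).2.length ≤ l.length := by
  induction l generalizing d acc with
  | nil => cases d <;> simp [braceGrab]
  | cons c r ih =>
      cases d with
      | zero => simp [braceGrab]
      | succ d => simpa [braceGrab] using Nat.le_succ_of_le (ih _ _)

theorem grabArg_len (l : List Char) : (grabArg l).2.length ≤ l.length := by
  have hdw : (l.dropWhile (fun c => c = ' ' || c = '\t')).length ≤ l.length :=
    l.length_dropWhile_le _
  unfold grabArg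
  split
  · simp
  all_goals rename_i heq
  · have := braceGrab_len ‹List Char› 1 []
    rw [heq] at hdw; simp at hdw ⊢; omega
  · rename_i r
    have := r.length_dropWhile_le (fun c => c.isAlpha || c = '*')
    rw [heq] at hdw; simp at hdw ⊢; omega
  · rw [heq] at hdw; simp at hdw ⊢; omega

-- Source B pass 1: tokenize into plain chars and (operator, argument) script units.
def tokenize : List Char → List PyTok
  | [] => []
  | c :: rest =>
    if c = '^' || c = '_' then
      PyTok.script c (grabArg rest).1 :: tokenize (grabArg rest).2
    else PyTok.plain c :: tokenize rest
termination_by l => l.length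
decreasing_by
  · have := grabArg_len rest; simp; omega
  · simp

-- Source B pass 2: emit tokens, inserting {} before every script unit after the first.
def render : List PyTok → Bool → List Char
  | [], _ => []
  | PyTok.plain c :: ts, seen => c :: render ts seen
  | PyTok.script op a :: ts, seen =>
      (if seen then ['{', '}'] else []) ++ op :: a ++ render ts true

def split_tensor_indices_py_alt (s : String) : String :=
  String.ofList (render (tokenize s.toList) false)

-- ===== PRECONDITION & SPEC =====
def Spec_split_tensor_indices_py (s : String) (out : String) : Prop := out = split_tensor_indices_py_alt s
instance (s : String) (out : String) : Decidable (Spec_split_tensor_indices_py s out) := by unfold Spec_split_tensor_indices_py; infer_instance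

-- ===== CLAIM (what is proved, stated in full; the proofs are below) =====
def Claim_equal_split_tensor_indices_py : Prop := ∀ (s : String), Dom_split_tensor_indices_py s → Spec_split_tensor_indices_py s (split_tensor_indices_py s)

-- ===== LEMMAS AND PROOFS =====
theorem skip_eq (l : List Char) :
    pySkipWS l = l.dropWhile (fun c => c = ' ' || c = '\t') := by
  induction l with
  | nil => simp [pySkipWS]
  | cons c r ih =>
      simp only [pySkipWS, List.dropWhile]
      rcases Bool.eq_false_or_eq_true (decide (c = ' ') || decide (c = '\t')) with hb | hb <;>
        simp [hb, ih]

theorem brace_eq (l : List Char) (d : Nat) (acc : List Char) :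
    braceGrab l d acc = (acc.reverse ++ (pyBraces l d).1, (pyBraces l d).2) := by
  induction l generalizing d acc with
  | nil => cases d <;> simp [braceGrab, pyBraces]
  | cons c r ih =>
      cases d with
      | zero => simp [braceGrab, pyBraces]
      | succ d => simp [braceGrab, pyBraces, ih]

theorem cmd_eq (l : List Char) :
    pyCmd l = (l.takeWhile (fun c => c.isAlpha || c = '*'),
               l.dropWhile (fun c => c.isAlpha || c = '*')) := by
  induction l with
  | nil => simp [pyCmd]
  | cons c r ih =>
      simp only [pyCmd, List.takeWhile, List.dropWhile]
      rcases Bool.eq_false_or_eq_true (c.isAlpha || decide (c = '*')) with hb | hb <;>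
        simp [hb, ih]

theorem main_eq (l : List Char) (seen : Bool) :
    stiAux l seen = render (tokenize l) seen := by
  fun_induction stiAux l seen with
  | case1 => simp [tokenize, render]
  | case2 ch rest seen hop heq =>
      rw [tokenize]; simp only [hop, if_pos]
      have hg : grabArg rest = ([], []) := by
        unfold grabArg; rw [← skip_eq, heq]
      simp [hg, tokenize, render]
  | case3 ch rest seen hop r heq ih =>
      rw [tokenize]; simp only [hop, if_pos]
      have hg : grabArg rest = ('{' :: (pyBraces r 1).1, (pyBraces r 1).2) := by
        unfold grabArg; rw [← skip_eq, heq]; simp [brace_eq]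
      simp [hg, render, ih]
  | case4 ch rest seen hop r heq ih =>
      rw [tokenize]; simp only [hop, if_pos]
      have hg : grabArg rest = ('\\' :: (pyCmd r).1, (pyCmd r).2) := by
        unfold grabArg; rw [← skip_eq, heq]; simp [cmd_eq]
      simp [hg, render, ih]
  | case5 ch rest seen hop c r hne1 hne2 heq ih =>
      rw [tokenize]; simp only [hop, if_pos]
      have hg : grabArg rest = ([c], r) := by
        unfold grabArg; rw [← skip_eq, heq]
        split <;> simp_all
      simp [hg, render, ih]
  | case6 ch rest seen hop ih =>
      rw [tokenize]; simp only [hop]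
      simp [render, ih]

-- ===== VERDICT (by name: the statement is the Claim_ definition above) =====
theorem split_tensor_indices_py_spec : Claim_equal_split_tensor_indices_py := by
  intro s _
  unfold Spec_split_tensor_indices_py split_tensor_indices_py split_tensor_indices_py_alt
  rw [main_eq]
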